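-- pv_equiv track=rewrite | github.com/VoropaevIvan/EGE | Шаблоны/№ 15/№ 15 дел+отр.py | check
-- ===== SOURCE A (Python) =====
-- def check(A):
--     for x in range(0, 10 ** 6):
--         x_A = (x % A == 0)
--         x_12 = (x % 12 == 0)
--         x_B = 70 <= x <= 80
--         f = x_12 and x_B and (not x_A)
--         if f != 0:  # Подставляем значение функции из условия
--             return 0
--     return 1
-- ===== SOURCE B (Python) =====
-- def check(A):
--     # The only multiple of 12 in [70, 80] is 72, so the million-step scan
--     # reduces to a single divisibility test.
--     return 1 if 72 % A == 0 else 0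
-- ===== Notes on version B (the rewrite author's own statement) =====
-- stated objective: faster
-- what changed: Replaced the 10^6-iteration scan by the closed-form test '72 % A == 0', since 72 is the only multiple of 12 in the window [70,80].
import Mathlib
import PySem

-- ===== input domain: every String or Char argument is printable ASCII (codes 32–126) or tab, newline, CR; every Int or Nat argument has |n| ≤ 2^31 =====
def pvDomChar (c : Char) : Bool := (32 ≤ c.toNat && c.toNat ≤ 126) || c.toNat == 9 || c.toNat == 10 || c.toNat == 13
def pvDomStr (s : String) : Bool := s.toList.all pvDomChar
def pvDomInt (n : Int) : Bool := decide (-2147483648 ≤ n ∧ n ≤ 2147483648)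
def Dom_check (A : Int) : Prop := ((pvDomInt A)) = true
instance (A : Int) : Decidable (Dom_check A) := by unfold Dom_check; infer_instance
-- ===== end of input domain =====

-- B replaces A's 10^6-step scan by the single test 72 % A == 0 (72 is the only multiple of 12 in [70,80]); faster.

-- ===== PORT A =====
-- the loop body of A, recursing over the list range(0, 10**6)
def checkLoop (A : Int) : List Int → Int
  | [] => 1
  | x :: rest =>
    let xA := PySem.Int.mod x A == 0
    let x12 := PySem.Int.mod x 12 == 0
    let xB := decide (70 ≤ x) && decide (x ≤ 80)
    let f := x12 && xB && !xA
    if f then 0 else checkLoop A rest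

def check (A : Int) : Int := checkLoop A (PySem.List.pyRange 0 (10 ^ 6) 1)

-- ===== PORT B =====
def check_alt (A : Int) : Int := if PySem.Int.mod 72 A == 0 then 1 else 0

-- ===== PRECONDITION & SPEC =====
-- A raises ZeroDivisionError on A = 0 (the expression x % A); excluded.
def Pre_check (A : Int) : Prop := A ≠ 0
instance (A : Int) : Decidable (Pre_check A) := by unfold Pre_check; infer_instance
def pvWitness_check : Int := 5

def Spec_check (A : Int) (out : Int) : Prop := out = check_alt A
instance (A : Int) (out : Int) : Decidable (Spec_check A out) := by unfold Spec_check; infer_instance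

-- ===== CLAIM (what is proved, stated in full; the proofs are below) =====
def Claim_equal_check : Prop := ∀ (A : Int), Dom_check A → Pre_check A → Spec_check A (check A)

-- ===== LEMMAS AND PROOFS =====

-- elements outside the window [70,80] never trigger the early return
theorem checkLoop_skip (A : Int) (l1 l2 : List Int)
    (h : ∀ x ∈ l1, ¬(70 ≤ x ∧ x ≤ 80)) :
    checkLoop A (l1 ++ l2) = checkLoop A l2 := by
  induction l1 with
  | nil => rfl
  | cons x xs ih =>
    have hx := h x (List.mem_cons_self)
    have hB : (decide (70 ≤ x) && decide (x ≤ 80)) = false := by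
      by_cases h1 : 70 ≤ x <;> by_cases h2 : x ≤ 80 <;> simp_all
    simp only [List.cons_append, checkLoop, hB, Bool.and_false, Bool.false_and]
    simp only [if_neg (by simp : ¬(false = true))]
    exact ih (fun y hy => h y (List.mem_cons_of_mem _ hy))

theorem pyRange_split :
    PySem.List.pyRange 0 (10 ^ 6) 1 =
      PySem.List.pyRange 0 70 1 ++
        (PySem.List.pyRange 70 81 1 ++ PySem.List.pyRange 81 (10 ^ 6) 1) := by
  rw [PySem.List.pyRange_one_append 0 70 (10 ^ 6) (by norm_num) (by norm_num),
      PySem.List.pyRange_one_append 70 81 (10 ^ 6) (by norm_num) (by norm_num)]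

theorem window_list :
    PySem.List.pyRange 70 81 1 = [70, 71, 72, 73, 74, 75, 76, 77, 78, 79, 80] := by
  decide

theorem checkLoop_cons (A x : Int) (rest : List Int) :
    checkLoop A (x :: rest) =
      if (PySem.Int.mod x 12 == 0) && (decide (70 ≤ x) && decide (x ≤ 80))
          && !(PySem.Int.mod x A == 0) then 0 else checkLoop A rest := rfl

theorem checkLoop_tail (A : Int) : checkLoop A (PySem.List.pyRange 81 (10 ^ 6) 1) = 1 := by
  have h := checkLoop_skip A (PySem.List.pyRange 81 (10 ^ 6) 1) []
    (fun x hx => by rw [PySem.List.mem_pyRange_one] at hx; omega)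
  rw [List.append_nil] at h
  exact h.trans rfl

-- the window [70,80] in front of any tail: only x = 72 can trigger the early return
theorem window_eval (A : Int) (l : List Int) :
    checkLoop A ([70, 71, 72, 73, 74, 75, 76, 77, 78, 79, 80] ++ l) =
      if PySem.Int.mod 72 A == 0 then checkLoop A l else 0 := by
  simp only [List.cons_append, List.nil_append, checkLoop_cons,
    show (PySem.Int.mod 70 12 == 0) = false from by decide,
    show (PySem.Int.mod 71 12 == 0) = false from by decide,
    show (PySem.Int.mod 72 12 == 0) = true from by decide,
    show (PySem.Int.mod 73 12 == 0) = false from by decide,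
    show (PySem.Int.mod 74 12 == 0) = false from by decide,
    show (PySem.Int.mod 75 12 == 0) = false from by decide,
    show (PySem.Int.mod 76 12 == 0) = false from by decide,
    show (PySem.Int.mod 77 12 == 0) = false from by decide,
    show (PySem.Int.mod 78 12 == 0) = false from by decide,
    show (PySem.Int.mod 79 12 == 0) = false from by decide,
    show (PySem.Int.mod 80 12 == 0) = false from by decide,
    Bool.false_and, Bool.true_and]
  cases hb : (PySem.Int.mod 72 A == 0) <;> simp

-- ===== VERDICT (by name: the statement is the Claim_ definition above) =====
theorem check_spec : Claim_equal_check := by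
  intro A _ hA
  unfold Spec_check check check_alt
  rw [pyRange_split,
      checkLoop_skip A _ _ (by
        intro x hx
        rw [PySem.List.mem_pyRange_one] at hx
        omega),
      window_list, window_eval]
  cases hb : (PySem.Int.mod 72 A == 0)
  · rw [if_neg (by decide), if_neg (by decide)]
  · rw [if_pos (by decide), if_pos (by decide)]
    exact checkLoop_tail A
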